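-- pv_equiv track=rewrite | github.com/JakJach/Alpha-Miner | alpha_miner/alpha_miner.py | alpha_miner
-- ===== SOURCE A (Python) =====
-- def alpha_miner(x):
--
--     # first, search for all events in process, find starts and stops
--     starts = []
--     stops = []
--     all_events = []
--
--     for row in x:
--         if row[0] not in starts:
--             starts.append(row[0])
--         if row[-1] not in stops:
--             stops.append(row[-1])
--         for event in row:
--             if event not in all_events:
--                 all_events.append(event)
--
--     starts = list(dict.fromkeys(starts))
--     stops = list(dict.fromkeys(stops))
--
--     sorted(starts)
--     sorted(stops)
--     sorted(all_events)
--
--     # define dictionaries and list for found possible connections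
--     direct_succession = {}
--     causality = {}
--     parallel = []
--     inv_causality = {}
--
--     post_temp = []
--     pre_temp = []
--     causality_temp = []
--     parallel_temp = []
--
--     for event in all_events:
--         for log in x:
--             for index, stage in enumerate(log):
--                 if stage == event and index < (len(log) - 1):
--                     if log[index + 1] not in post_temp:
--                         post_temp.append(log[index + 1])
--                 if stage == event and index > 0:
--                     if log[index - 1] not in pre_temp:
--                         pre_temp.append(log[index - 1])
--         sorted(post_temp)
--         sorted(pre_temp)
--
--         if post_temp:
--             direct_succession[event] = post_temp
--
--         for element in post_temp:
--             if element not in pre_temp: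
--                 causality_temp.append(element)
--             else:
--                 parallel_temp.append(element)
--
--         if causality_temp:
--             causality[event] = causality_temp
--
--         # add a pair of parallel events
--         if parallel_temp:
--             parallel.append(sorted([event, parallel_temp[0]]))
--
--         # clear temp matrices
--         pre_temp = []
--         post_temp = []
--         causality_temp = []
--         parallel_temp = []
--
--     for stage, followed_stage in causality.items():
--         if len(followed_stage) == 1:
--             index = causality.get(stage)[0]
--             if index not in inv_causality:
--                 inv_causality[index] = [stage]
--             else:
--                 temp = inv_causality.get(index)
--                 temp.append(stage)
--                 inv_causality[index] = temp
--
--     return all_events, starts, stops, direct_succession, causality, parallel, inv_causality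
-- ===== SOURCE B (Python) =====
-- def alpha_miner(x):
--     # One pass over the logs builds starts/stops/all_events plus successor and
--     # predecessor adjacency indexes; the relations are then derived per event
--     # from the indexes, with no repeated rescanning of the logs.
--     starts = []
--     stops = []
--     all_events = []
--     succ = {}
--     pred = {}
--     for row in x:
--         if row[0] not in starts:
--             starts.append(row[0])
--         if row[-1] not in stops:
--             stops.append(row[-1])
--         for event in row:
--             if event not in all_events:
--                 all_events.append(event)
--         for a, b in zip(row, row[1:]):
--             sa = succ.setdefault(a, [])
--             if b not in sa:
--                 sa.append(b)
--             pb = pred.setdefault(b, [])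
--             if a not in pb:
--                 pb.append(a)
--
--     direct_succession = {}
--     causality = {}
--     parallel = []
--     inv_causality = {}
--
--     for event in all_events:
--         post = succ.get(event, [])
--         pre = pred.get(event, [])
--         if post:
--             direct_succession[event] = post
--         caus = [b for b in post if b not in pre]
--         if caus:
--             causality[event] = caus
--         shared = next((b for b in post if b in pre), None)
--         if shared is not None:
--             parallel.append(sorted([event, shared]))
--
--     for stage, followed in causality.items():
--         if len(followed) == 1:
--             inv_causality.setdefault(followed[0], []).append(stage)
--
--     return all_events, starts, stops, direct_succession, causality, parallel, inv_causality
-- ===== Notes on version B (the rewrite author's own statement) =====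
-- stated objective: faster
-- what changed: B builds successor/predecessor adjacency dicts in a single pass over the logs and derives direct_succession/causality/parallel per event from those indexes, replacing A's per-event rescan of every position of every log.
import Mathlib
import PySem

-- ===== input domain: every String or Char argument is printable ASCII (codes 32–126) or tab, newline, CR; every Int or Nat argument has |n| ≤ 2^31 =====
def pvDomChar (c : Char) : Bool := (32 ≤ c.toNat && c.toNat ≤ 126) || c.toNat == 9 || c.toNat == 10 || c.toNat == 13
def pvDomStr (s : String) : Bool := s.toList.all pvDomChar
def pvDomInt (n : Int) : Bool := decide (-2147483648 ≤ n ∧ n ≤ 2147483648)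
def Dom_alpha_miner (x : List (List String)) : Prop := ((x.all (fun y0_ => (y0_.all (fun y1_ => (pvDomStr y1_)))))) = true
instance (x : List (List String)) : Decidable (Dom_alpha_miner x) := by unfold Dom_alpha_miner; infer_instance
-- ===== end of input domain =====

-- B replaces A's per-event rescanning of all logs by successor/predecessor indexes
-- built in one pass, then derives the relations per event from the indexes (objective: faster).

-- ===== PORT A =====
-- Literal transliteration of A, one named helper per loop.  The bare `sorted(starts)` /
-- `sorted(stops)` / `sorted(all_events)` / `sorted(post_temp)` / `sorted(pre_temp)`
-- statements in A discard their results and are omitted; `list(dict.fromkeys(...))`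
-- is PySem.List.dedup.

-- A's first loop: starts, stops, all_events
def pvA_first (x : List (List String)) : List String × List String × List String :=
  x.foldl (fun (acc : List String × List String × List String) row =>
      (PySem.Set.add acc.1 (PySem.List.pyGetD row 0 ""),
       PySem.Set.add acc.2.1 (PySem.List.pyGetD row (-1) ""),
       row.foldl PySem.Set.add acc.2.2)) ([], [], [])

-- A's per-event scan of all logs: (post_temp, pre_temp)
def pvA_scan (x : List (List String)) (event : String) : List String × List String :=
  x.foldl (fun (pp : List String × List String) log =>
      (PySem.List.enumerate log).foldl (fun (pp : List String × List String) is =>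
          (if is.2 = event ∧ is.1 < PySem.List.len log - 1
             then PySem.Set.add pp.1 (PySem.List.pyGetD log (is.1 + 1) "") else pp.1,
           if is.2 = event ∧ is.1 > 0
             then PySem.Set.add pp.2 (PySem.List.pyGetD log (is.1 - 1) "") else pp.2)) pp)
    ([], [])

-- A's split of post_temp into (causality_temp, parallel_temp)
def pvA_split (post pre : List String) : List String × List String :=
  post.foldl (fun (cp : List String × List String) element =>
      if element ∉ pre then (cp.1 ++ [element], cp.2) else (cp.1, cp.2 ++ [element])) ([], [])

-- A's main loop over all_events: (direct_succession, causality, parallel)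
def pvA_trip (x : List (List String)) (all_events : List String) :
    PySem.Dict String (List String) × PySem.Dict String (List String) × List (List String) :=
  all_events.foldl
    (fun (acc : PySem.Dict String (List String) × PySem.Dict String (List String) × List (List String)) event =>
      let pp := pvA_scan x event
      let ds := if pp.1 ≠ [] then acc.1.insert event pp.1 else acc.1
      let cp := pvA_split pp.1 pp.2
      let caus := if cp.1 ≠ [] then acc.2.1.insert event cp.1 else acc.2.1
      let par := if cp.2 ≠ [] then acc.2.2 ++ [PySem.List.sorted [event, PySem.List.pyGetD cp.2 0 ""] (fun y => y)] else acc.2.2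
      (ds, caus, par))
    (PySem.Dict.empty, PySem.Dict.empty, [])

-- A's inv_causality loop over causality.items()
def pvA_inv (c : PySem.Dict String (List String)) : PySem.Dict String (List String) :=
  c.items.foldl (fun (inv : PySem.Dict String (List String)) sf =>
      if sf.2.length = 1 then
        let index := PySem.List.pyGetD ((c.get? sf.1).getD []) 0 ""
        if ¬ inv.contains index then inv.insert index [sf.1]
        else inv.insert index (inv.getD index [] ++ [sf.1])
      else inv) PySem.Dict.empty

def alpha_miner (x : List (List String)) : List String × List String × List String × (List (String × List String)) × (List (String × List String)) × List (List String) × (List (String × List String)) :=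
  let fst3 := pvA_first x
  let starts := PySem.List.dedup fst3.1
  let stops := PySem.List.dedup fst3.2.1
  let all_events := fst3.2.2
  let trip := pvA_trip x all_events
  let inv := pvA_inv trip.2.1
  (all_events, starts, stops, trip.1.items, trip.2.1.items, trip.2.2, inv.items)

-- ===== PORT B =====
-- Transliteration of B (Source B), one named helper per loop: one pass builds
-- starts/stops/all_events and the succ/pred adjacency dicts (setdefault+append =
-- Dict.modify); the relations are then derived per event from the indexes.

-- B's single pass: starts, stops, all_events, succ, pred
def pvB_first (x : List (List String)) : List String × List String × List String ×
    PySem.Dict String (List String) × PySem.Dict String (List String) :=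
  x.foldl (fun (acc : List String × List String × List String ×
        PySem.Dict String (List String) × PySem.Dict String (List String)) row =>
      (PySem.Set.add acc.1 (PySem.List.pyGetD row 0 ""),
       PySem.Set.add acc.2.1 (PySem.List.pyGetD row (-1) ""),
       row.foldl PySem.Set.add acc.2.2.1,
       (row.zip row.tail).foldl
         (fun (sp : PySem.Dict String (List String) × PySem.Dict String (List String)) ab =>
           (sp.1.modify ab.1 [] (fun l => PySem.Set.add l ab.2),
            sp.2.modify ab.2 [] (fun l => PySem.Set.add l ab.1))) acc.2.2.2))
    ([], [], [], PySem.Dict.empty, PySem.Dict.empty)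

-- B's derivation loop over all_events
def pvB_derive (succ pred : PySem.Dict String (List String)) (all_events : List String) :
    PySem.Dict String (List String) × PySem.Dict String (List String) × List (List String) :=
  all_events.foldl
    (fun (acc : PySem.Dict String (List String) × PySem.Dict String (List String) × List (List String)) event =>
      let post := succ.getD event []
      let pre := pred.getD event []
      let ds := if post ≠ [] then acc.1.insert event post else acc.1
      let caus := post.filter (fun b => decide (b ∉ pre))
      let causD := if caus ≠ [] then acc.2.1.insert event caus else acc.2.1
      let par := match post.find? (fun b => decide (b ∈ pre)) with
        | some s => acc.2.2 ++ [PySem.List.sorted [event, s] (fun y => y)]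
        | none => acc.2.2
      (ds, causD, par)) (PySem.Dict.empty, PySem.Dict.empty, [])

-- B's inv_causality loop (setdefault(...).append = Dict.modify)
def pvB_inv (c : PySem.Dict String (List String)) : PySem.Dict String (List String) :=
  c.items.foldl (fun (inv : PySem.Dict String (List String)) sf =>
      if sf.2.length = 1 then inv.modify (PySem.List.pyGetD sf.2 0 "") [] (fun l => l ++ [sf.1]) else inv)
    PySem.Dict.empty

def alpha_miner_alt (x : List (List String)) : List String × List String × List String × (List (String × List String)) × (List (String × List String)) × List (List String) × (List (String × List String)) :=
  let st := pvB_first x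
  let derive := pvB_derive st.2.2.2.1 st.2.2.2.2 st.2.2.1
  let inv := pvB_inv derive.2.1
  (st.2.2.1, st.1, st.2.1, derive.1.items, derive.2.1.items, derive.2.2, inv.items)

-- ===== PRECONDITION & SPEC =====
-- Pre_ excludes inputs containing an empty trace: Python A raises IndexError on row[0] there (and B does too).
def Pre_alpha_miner (x : List (List String)) : Prop := ∀ row ∈ x, row ≠ []
instance (x : List (List String)) : Decidable (Pre_alpha_miner x) := by unfold Pre_alpha_miner; infer_instance
def pvWitness_alpha_miner : List (List String) := [["a", "b", "d"], ["a", "c", "b", "d"], ["b", "c"]]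
def Spec_alpha_miner (x : List (List String)) (out : List String × List String × List String × (List (String × List String)) × (List (String × List String)) × List (List String) × (List (String × List String))) : Prop := out = alpha_miner_alt x
instance (x : List (List String)) (out : List String × List String × List String × (List (String × List String)) × (List (String × List String)) × List (List String) × (List (String × List String))) : Decidable (Spec_alpha_miner x out) := by
  unfold Spec_alpha_miner
  -- instance search alone times out on the 7-component product; assemble it explicitly
  have h3 : DecidableEq (List (String × List String) × List (List String) × List (String × List String)) := by infer_instance
  have h4 : DecidableEq ((List (String × List String)) × List (String × List String) × List (List String) × List (String × List String)) := @instDecidableEqProd _ _ _ h3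
  have h5 : DecidableEq (List String × (List (String × List String)) × List (String × List String) × List (List String) × List (String × List String)) := @instDecidableEqProd _ _ _ h4
  have h6 : DecidableEq (List String × List String × (List (String × List String)) × List (String × List String) × List (List String) × List (String × List String)) := @instDecidableEqProd _ _ _ h5
  exact (@instDecidableEqProd _ _ _ h6) out (alpha_miner_alt x)

-- ===== CLAIM (what is proved, stated in full; the proofs are below) =====
def Claim_equal_alpha_miner : Prop := ∀ (x : List (List String)), Dom_alpha_miner x → Pre_alpha_miner x → Spec_alpha_miner x (alpha_miner x)

-- ===== LEMMAS AND PROOFS =====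

-- the adjacent pairs of all logs, in log-then-position order
def pvPairs (x : List (List String)) : List (String × String) := x.flatMap (fun r => r.zip r.tail)

-- per-event accumulation steps over a pair list (successor / predecessor side)
def pvAddStep (e : String) : List String → String × String → List String :=
  fun l ab => if ab.1 = e then PySem.Set.add l ab.2 else l
def pvPreStep (e : String) : List String → String × String → List String :=
  fun l ab => if ab.2 = e then PySem.Set.add l ab.1 else l

lemma pvZipCons (a : String) (t : List String) :
    (a :: t).zip t = ([a].zip (t.take 1)) ++ t.zip t.tail := by
  cases t <;> simp

-- A's post_temp scan of one log equals the pair fold (pre = already-consumed prefix)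
lemma pvEnumPost (e : String) (pre t acc : List String) :
    (PySem.List.enumerate t (pre.length : Int)).foldl
      (fun l is => if is.2 = e ∧ is.1 < PySem.List.len (pre ++ t) - 1
         then PySem.Set.add l (PySem.List.pyGetD (pre ++ t) (is.1 + 1) "") else l) acc
    = (t.zip t.tail).foldl (pvAddStep e) acc := by
  induction t generalizing pre acc with
  | nil => simp [PySem.List.enumerate]
  | cons a t ih =>
    cases t with
    | nil =>
      have hc : ¬ ((pre.length : Int) < PySem.List.len (pre ++ [a]) - 1) := by
        rw [PySem.List.len_eq]; simp
      simp [PySem.List.enumerate]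
    | cons b t' =>
      have hget : PySem.List.pyGetD (pre ++ a :: b :: t') ((pre.length : Int) + 1) "" = b := by
        have h1 : ((pre.length : Int) + 1) = ((pre.length + 1 : Nat) : Int) := by simp
        rw [h1, PySem.List.pyGetD_natCast, List.getD_eq_getElem?_getD,
            List.getElem?_append_right (by omega)]
        simp
      have hstep : PySem.List.enumerate (a :: b :: t') (pre.length : Int)
          = ((pre.length : Int), a) :: PySem.List.enumerate (b :: t') ((pre.length : Int) + 1) := by
        simp [PySem.List.enumerate]
      rw [hstep]
      simp only [List.foldl_cons]
      have hone : (if a = e ∧ (pre.length : Int) < PySem.List.len (pre ++ a :: b :: t') - 1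
            then PySem.Set.add acc (PySem.List.pyGetD (pre ++ a :: b :: t') ((pre.length : Int) + 1) "")
            else acc) = (if a = e then PySem.Set.add acc b else acc) := by
        rw [hget]; by_cases h : a = e <;> simp [h]
      rw [hone]
      have hre : pre ++ a :: b :: t' = (pre ++ [a]) ++ (b :: t') := by simp
      have hlen1 : ((pre.length : Int) + 1) = (((pre ++ [a]).length : Nat) : Int) := by
        simp
      rw [hre, hlen1, ih (pre ++ [a])]
      simp [pvAddStep]

-- A's pre_temp scan of one log equals the pair fold (with the seam pair from the prefix)
lemma pvEnumPre (e : String) (pre t acc : List String) :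
    (PySem.List.enumerate t (pre.length : Int)).foldl
      (fun l is => if is.2 = e ∧ is.1 > 0
         then PySem.Set.add l (PySem.List.pyGetD (pre ++ t) (is.1 - 1) "") else l) acc
    = (((pre.drop (pre.length - 1)).zip (t.take 1)) ++ t.zip t.tail).foldl (pvPreStep e) acc := by
  induction t generalizing pre acc with
  | nil => simp [PySem.List.enumerate]
  | cons a t' ih =>
    have hstep : PySem.List.enumerate (a :: t') (pre.length : Int)
        = ((pre.length : Int), a) :: PySem.List.enumerate t' ((pre.length : Int) + 1) := by
      simp [PySem.List.enumerate]
    have hlen1 : ((pre.length : Int) + 1) = (((pre ++ [a]).length : Nat) : Int) := by simp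
    have hre : pre ++ a :: t' = (pre ++ [a]) ++ t' := by simp
    have hzip : (a :: t').zip t' = ([a].zip (t'.take 1)) ++ t'.zip t'.tail := pvZipCons a t'
    rcases pre.eq_nil_or_concat with hpre | ⟨q, p, hpre⟩
    · subst hpre
      rw [hstep]
      simp only [List.foldl_cons]
      have hone : (if a = e ∧ (((List.length ([] : List String)) : Int)) > 0
            then PySem.Set.add acc (PySem.List.pyGetD ([] ++ a :: t') (((List.length ([] : List String)) : Int) - 1) "")
            else acc) = acc := by simp
      rw [hone, hre, hlen1, ih (pre := [] ++ [a])]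
      simp only [List.tail_cons]
      rw [hzip]
      simp
    · rw [List.concat_eq_append] at hpre
      subst hpre
      rw [hstep]
      simp only [List.foldl_cons]
      have hget : PySem.List.pyGetD ((q ++ [p]) ++ a :: t') ((((q ++ [p]).length : Nat) : Int) - 1) "" = p := by
        have h1 : ((((q ++ [p]).length : Nat) : Int) - 1) = ((q.length : Nat) : Int) := by
          simp
        rw [h1, PySem.List.pyGetD_natCast, List.getD_eq_getElem?_getD]
        have h2 : (q ++ [p]) ++ a :: t' = q ++ (p :: a :: t') := by simp
        rw [h2, List.getElem?_append_right (by omega)]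
        simp
      have hone : (if a = e ∧ ((((q ++ [p]).length : Nat) : Int)) > 0
            then PySem.Set.add acc (PySem.List.pyGetD ((q ++ [p]) ++ a :: t') ((((q ++ [p]).length : Nat) : Int) - 1) "")
            else acc) = (if a = e then PySem.Set.add acc p else acc) := by
        rw [hget]
        by_cases h : a = e <;> simp [h]
      rw [hone, hre, hlen1, ih (pre := (q ++ [p]) ++ [a])]
      have hseam : ((q ++ [p]).drop ((q ++ [p]).length - 1)).zip ((a :: t').take 1) = [(p, a)] := by
        have : (q ++ [p]).length - 1 = q.length := by simp
        rw [this, List.drop_left]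
        simp
      have hseam2 : (((q ++ [p]) ++ [a]).drop (((q ++ [p]) ++ [a]).length - 1)).zip (t'.take 1)
          = [a].zip (t'.take 1) := by
        have : ((q ++ [p]) ++ [a]).length - 1 = (q ++ [p]).length := by simp
        rw [this, List.drop_left]
      rw [hseam2, hseam]
      simp only [List.tail_cons]
      rw [hzip]
      simp [pvPreStep]

-- A's whole per-event double scan equals the two folds over all pairs
lemma pvScanEq (x : List (List String)) (event : String) :
    pvA_scan x event
    = ((pvPairs x).foldl (pvAddStep event) [], (pvPairs x).foldl (pvPreStep event) []) := by
  unfold pvA_scan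
  have h1 : ∀ (log : List String) (pp : List String × List String),
      (PySem.List.enumerate log).foldl (fun (pp : List String × List String) is =>
          (if is.2 = event ∧ is.1 < PySem.List.len log - 1
             then PySem.Set.add pp.1 (PySem.List.pyGetD log (is.1 + 1) "") else pp.1,
           if is.2 = event ∧ is.1 > 0
             then PySem.Set.add pp.2 (PySem.List.pyGetD log (is.1 - 1) "") else pp.2)) pp
      = ((log.zip log.tail).foldl (pvAddStep event) pp.1,
         (log.zip log.tail).foldl (pvPreStep event) pp.2) := by
    intro log pp
    obtain ⟨u, v⟩ := pp
    rw [PySem.List.foldl_prod_mk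
          (f := fun l (is : Int × String) => if is.2 = event ∧ is.1 < PySem.List.len log - 1
              then PySem.Set.add l (PySem.List.pyGetD log (is.1 + 1) "") else l)
          (g := fun l (is : Int × String) => if is.2 = event ∧ is.1 > 0
              then PySem.Set.add l (PySem.List.pyGetD log (is.1 - 1) "") else l)]
    have hp := pvEnumPost event [] log u
    have hq := pvEnumPre event [] log v
    simp only [List.nil_append, List.length_nil, Nat.cast_zero, List.drop_nil,
      List.zip_nil_left] at hp hq
    rw [hp, hq]
  have hfun : (fun (pp : List String × List String) log =>
        (PySem.List.enumerate log).foldl (fun (pp : List String × List String) is =>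
            (if is.2 = event ∧ is.1 < PySem.List.len log - 1
               then PySem.Set.add pp.1 (PySem.List.pyGetD log (is.1 + 1) "") else pp.1,
             if is.2 = event ∧ is.1 > 0
               then PySem.Set.add pp.2 (PySem.List.pyGetD log (is.1 - 1) "") else pp.2)) pp)
      = (fun (pp : List String × List String) log =>
        ((log.zip log.tail).foldl (pvAddStep event) pp.1,
         (log.zip log.tail).foldl (pvPreStep event) pp.2)) := by
    funext pp log
    exact h1 log pp
  have houter : ∀ (y : List (List String)) (u v : List String),
      y.foldl (fun (pp : List String × List String) log =>
        ((log.zip log.tail).foldl (pvAddStep event) pp.1,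
         (log.zip log.tail).foldl (pvPreStep event) pp.2)) (u, v)
      = ((pvPairs y).foldl (pvAddStep event) u, (pvPairs y).foldl (pvPreStep event) v) := by
    intro y
    induction y with
    | nil => intro u v; simp [pvPairs]
    | cons r y ih =>
      intro u v
      simp only [List.foldl_cons, ih, pvPairs, List.flatMap_cons, List.foldl_append]
  rw [hfun]
  exact houter x [] []

-- A's first loop, componentwise
lemma pvAfirstEq (x : List (List String)) :
    pvA_first x
    = (x.foldl (fun s row => PySem.Set.add s (PySem.List.pyGetD row 0 "")) [],
       x.foldl (fun s row => PySem.Set.add s (PySem.List.pyGetD row (-1) "")) [],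
       x.foldl (fun s row => row.foldl PySem.Set.add s) []) := by
  unfold pvA_first
  rw [PySem.List.foldl_prod_mk (f := fun s row => PySem.Set.add s (PySem.List.pyGetD row 0 ""))
        (g := fun (s : List String × List String) row =>
          (PySem.Set.add s.1 (PySem.List.pyGetD row (-1) ""), row.foldl PySem.Set.add s.2)),
      PySem.List.foldl_prod_mk (f := fun s row => PySem.Set.add s (PySem.List.pyGetD row (-1) ""))
        (g := fun (s : List String) row => row.foldl PySem.Set.add s)]

-- B's first pass, componentwise; the dict components are folds over all pairs
lemma pvBfirstEq (x : List (List String)) :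
    pvB_first x
    = (x.foldl (fun s row => PySem.Set.add s (PySem.List.pyGetD row 0 "")) [],
       x.foldl (fun s row => PySem.Set.add s (PySem.List.pyGetD row (-1) "")) [],
       x.foldl (fun s row => row.foldl PySem.Set.add s) [],
       (pvPairs x).foldl (fun d ab => d.modify ab.1 [] (fun l => PySem.Set.add l ab.2)) PySem.Dict.empty,
       (pvPairs x).foldl (fun d ab => d.modify ab.2 [] (fun l => PySem.Set.add l ab.1)) PySem.Dict.empty) := by
  unfold pvB_first
  suffices h : ∀ (s0 t0 a0 : List String) (d0 p0 : PySem.Dict String (List String)),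
      x.foldl (fun (acc : List String × List String × List String ×
          PySem.Dict String (List String) × PySem.Dict String (List String)) row =>
        (PySem.Set.add acc.1 (PySem.List.pyGetD row 0 ""),
         PySem.Set.add acc.2.1 (PySem.List.pyGetD row (-1) ""),
         row.foldl PySem.Set.add acc.2.2.1,
         (row.zip row.tail).foldl
           (fun (sp : PySem.Dict String (List String) × PySem.Dict String (List String)) ab =>
             (sp.1.modify ab.1 [] (fun l => PySem.Set.add l ab.2),
              sp.2.modify ab.2 [] (fun l => PySem.Set.add l ab.1))) acc.2.2.2))
      (s0, t0, a0, d0, p0)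
      = (x.foldl (fun s row => PySem.Set.add s (PySem.List.pyGetD row 0 "")) s0,
         x.foldl (fun s row => PySem.Set.add s (PySem.List.pyGetD row (-1) "")) t0,
         x.foldl (fun s row => row.foldl PySem.Set.add s) a0,
         (pvPairs x).foldl (fun d ab => d.modify ab.1 [] (fun l => PySem.Set.add l ab.2)) d0,
         (pvPairs x).foldl (fun d ab => d.modify ab.2 [] (fun l => PySem.Set.add l ab.1)) p0) by
    exact h [] [] [] PySem.Dict.empty PySem.Dict.empty
  induction x with
  | nil => intro s0 t0 a0 d0 p0; simp [pvPairs]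
  | cons row x ih =>
    intro s0 t0 a0 d0 p0
    simp only [List.foldl_cons]
    rw [ih, PySem.List.foldl_prod_mk
          (f := fun (d : PySem.Dict String (List String)) (ab : String × String) =>
            d.modify ab.1 [] (fun l => PySem.Set.add l ab.2))
          (g := fun (d : PySem.Dict String (List String)) (ab : String × String) =>
            d.modify ab.2 [] (fun l => PySem.Set.add l ab.1))]
    simp [pvPairs, List.foldl_append]

-- getD through the succ-dict fold
lemma pvSuccGetD (ps : List (String × String)) (d : PySem.Dict String (List String)) (e : String) :
    (ps.foldl (fun d ab => d.modify ab.1 [] (fun l => PySem.Set.add l ab.2)) d).getD e []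
    = ps.foldl (pvAddStep e) (d.getD e []) := by
  induction ps generalizing d with
  | nil => rfl
  | cons ab ps ih =>
    simp only [List.foldl_cons]
    rw [ih, PySem.Dict.getD_modify]
    unfold pvAddStep
    by_cases h : ab.1 = e
    · simp [h]
    · have h' : ¬ e = ab.1 := fun hc => h hc.symm
      simp [h, h']

-- getD through the pred-dict fold
lemma pvPredGetD (ps : List (String × String)) (d : PySem.Dict String (List String)) (e : String) :
    (ps.foldl (fun d ab => d.modify ab.2 [] (fun l => PySem.Set.add l ab.1)) d).getD e []
    = ps.foldl (pvPreStep e) (d.getD e []) := by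
  induction ps generalizing d with
  | nil => rfl
  | cons ab ps ih =>
    simp only [List.foldl_cons]
    rw [ih, PySem.Dict.getD_modify]
    unfold pvPreStep
    by_cases h : ab.2 = e
    · simp [h]
    · have h' : ¬ e = ab.2 := fun hc => h hc.symm
      simp [h, h']

-- A's causality/parallel split loop is a pair of filters
lemma pvSplitEq (post pre : List String) :
    pvA_split post pre
    = (post.filter (fun b => decide (b ∉ pre)), post.filter (fun b => decide (b ∈ pre))) := by
  unfold pvA_split
  have hstep : (fun (cp : List String × List String) element =>
        if element ∉ pre then (cp.1 ++ [element], cp.2) else (cp.1, cp.2 ++ [element]))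
      = (fun (cp : List String × List String) element =>
        ((fun c el => if el ∉ pre then c ++ [el] else c) cp.1 element,
         (fun c el => if el ∈ pre then c ++ [el] else c) cp.2 element)) := by
    funext cp el
    by_cases h : el ∈ pre <;> simp [h]
  rw [hstep, PySem.List.foldl_prod_mk (f := fun c el => if el ∉ pre then c ++ [el] else c)
        (g := fun c el => if el ∈ pre then c ++ [el] else c),
      PySem.List.foldl_append_ite_eq_filter, PySem.List.foldl_append_ite_eq_filter]
  simp

-- dedup is the identity on a Set.add-built list
lemma pvDedupFold (f : List String → String) (x : List (List String)) :
    PySem.List.dedup (x.foldl (fun s row => PySem.Set.add s (f row)) [])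
    = x.foldl (fun s row => PySem.Set.add s (f row)) [] := by
  rw [← PySem.Set.update_map_eq_foldl_add]
  simp only [PySem.List.dedup]
  exact PySem.Set.ofList_eq_self_of_nodup _ (PySem.Set.nodup_update _ _ List.nodup_nil)

-- keys of the causality dict stay unique through the derivation fold
lemma pvDeriveNodupAux (d1 d2 : PySem.Dict String (List String)) (l : List String)
    (acc : PySem.Dict String (List String) × PySem.Dict String (List String) × List (List String))
    (h : acc.2.1.keys.Nodup) :
    ((l.foldl
      (fun (acc : PySem.Dict String (List String) × PySem.Dict String (List String) × List (List String)) event =>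
        let post := d1.getD event []
        let pre := d2.getD event []
        let ds := if post ≠ [] then acc.1.insert event post else acc.1
        let caus := post.filter (fun b => decide (b ∉ pre))
        let causD := if caus ≠ [] then acc.2.1.insert event caus else acc.2.1
        let par := match post.find? (fun b => decide (b ∈ pre)) with
          | some s => acc.2.2 ++ [PySem.List.sorted [event, s] (fun y => y)]
          | none => acc.2.2
        (ds, causD, par)) acc).2.1.keys.Nodup) := by
  induction l generalizing acc with
  | nil => exact h
  | cons ev l ih =>
    simp only [List.foldl_cons]
    apply ih
    dsimp only
    split_ifs with h1
    · exact PySem.Dict.nodup_keys_insert _ _ _ h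
    · exact h

lemma pvDeriveNodup (d1 d2 : PySem.Dict String (List String)) (l : List String) :
    (pvB_derive d1 d2 l).2.1.keys.Nodup := by
  unfold pvB_derive
  exact pvDeriveNodupAux d1 d2 l _ PySem.Dict.nodup_keys_empty

-- the two inv_causality loops agree on a dict with unique keys
lemma pvInvEqLemma (c : PySem.Dict String (List String)) (h : c.keys.Nodup) :
    pvA_inv c = pvB_inv c := by
  unfold pvA_inv pvB_inv
  apply PySem.List.foldl_congr_mem'
  intro sf hmem inv
  by_cases hlen : sf.2.length = 1
  · simp only [hlen, if_true]
    have hget : c.get? sf.1 = some sf.2 :=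
      PySem.Dict.get?_of_mem_items c (by simpa using hmem) h
    rw [hget]
    simp only [Option.getD_some, PySem.Dict.modify]
    by_cases hc : inv.contains (PySem.List.pyGetD sf.2 0 "")
    · simp [hc]
    · simp [hc, PySem.Dict.getD_of_not_contains _ _ (by simpa using hc)]
  · simp [hlen]

-- A's main loop equals B's derivation loop run on the adjacency dicts
lemma pvTripEq (x : List (List String)) (all_events : List String) :
    pvA_trip x all_events
    = pvB_derive
        ((pvPairs x).foldl (fun d ab => d.modify ab.1 [] (fun l => PySem.Set.add l ab.2)) PySem.Dict.empty)
        ((pvPairs x).foldl (fun d ab => d.modify ab.2 [] (fun l => PySem.Set.add l ab.1)) PySem.Dict.empty)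
        all_events := by
  unfold pvA_trip pvB_derive
  apply PySem.List.foldl_congr_mem'
  intro event _ acc
  dsimp only
  rw [pvScanEq, pvSplitEq, pvSuccGetD, pvPredGetD, PySem.Dict.getD_empty]
  dsimp only
  simp only [Prod.mk.injEq]
  refine ⟨trivial, trivial, ?_⟩
  have hh := List.head?_filter (p := fun b => decide (b ∈ (pvPairs x).foldl (pvPreStep event) []))
    (l := (pvPairs x).foldl (pvAddStep event) [])
  cases hfl : ((pvPairs x).foldl (pvAddStep event) []).filter
      (fun b => decide (b ∈ (pvPairs x).foldl (pvPreStep event) [])) with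
  | nil =>
    rw [hfl] at hh
    rw [← hh]
    simp
  | cons s0 r =>
    rw [hfl] at hh
    rw [← hh]
    simp [PySem.List.pyGetD_zero_cons]


-- ===== VERDICT (by name: the statement is the Claim_ definition above) =====
theorem alpha_miner_spec : Claim_equal_alpha_miner := by
  intro x _hdom _hpre
  unfold Spec_alpha_miner
  show alpha_miner x = alpha_miner_alt x
  unfold alpha_miner alpha_miner_alt
  dsimp only
  rw [pvAfirstEq, pvBfirstEq]
  dsimp only
  rw [pvTripEq]
  simp only [pvDedupFold]
  rw [pvInvEqLemma _ (pvDeriveNodup _ _ _)]
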